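-- pv_equiv track=rewrite | github.com/ScottForsmann/AdventOfCode2023 | Day9/day9b.py | generate_zero_sequences
-- ===== SOURCE A (Python) =====
-- def check_valid_zero_sequence(sequence):
--     for num in sequence:
--         if num != 0:
--             return False
--     return True
--
-- def generate_zero_sequences(sequence):
--     new_sequences = [sequence]
--     while not check_valid_zero_sequence(new_sequences[-1]):
--         temp = []
--         for i in range(1, len(new_sequences[-1])):
--             difference = new_sequences[-1][i] - new_sequences[-1][i - 1]
--             temp.append(difference)
--         if not temp:
--             temp = [0]
--         new_sequences.append(temp)
--     return new_sequences
-- ===== SOURCE B (Python) =====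
-- def generate_zero_sequences(sequence):
--     if all(x == 0 for x in sequence):
--         return [sequence]
--     diffs = [b - a for a, b in zip(sequence, sequence[1:])] or [0]
--     return [sequence] + generate_zero_sequences(diffs)
-- ===== Notes on version B (the rewrite author's own statement) =====
-- stated objective: simpler
-- what changed: Recursive decomposition threading the triangle through the call stack (all-zero base case, zip-based difference comprehension) instead of an explicit while loop growing a list and re-indexing its last element.
import Mathlib
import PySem

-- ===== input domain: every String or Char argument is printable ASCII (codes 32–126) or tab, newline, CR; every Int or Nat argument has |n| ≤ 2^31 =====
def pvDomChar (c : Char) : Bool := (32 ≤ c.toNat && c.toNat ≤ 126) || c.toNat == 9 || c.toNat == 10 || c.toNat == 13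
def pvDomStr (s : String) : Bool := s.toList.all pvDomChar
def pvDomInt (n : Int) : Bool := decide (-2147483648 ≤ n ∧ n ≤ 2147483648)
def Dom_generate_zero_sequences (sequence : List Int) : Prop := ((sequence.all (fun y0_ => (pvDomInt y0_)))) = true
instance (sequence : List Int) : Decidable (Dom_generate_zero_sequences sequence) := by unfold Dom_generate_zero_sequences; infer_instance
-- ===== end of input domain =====

-- B replaces A's while loop over a growing list by a recursive decomposition (zip-based diffs, all-zero base case); proved equal on all inputs.


-- ===== PORT A =====
-- helper: check_valid_zero_sequence, the for-loop with early return
def check_valid_zero_sequence (sequence : List Int) : Bool :=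
  match sequence with
  | [] => true
  | num :: rest => if num ≠ 0 then false else check_valid_zero_sequence rest

-- inner for-loop of A: temp built by appending last[i]-last[i-1] for i in range(1, len(last))
def pvDiffsA (last : List Int) : List Int :=
  (PySem.List.pyRange 1 last.length 1).foldl
    (fun temp i => temp ++ [PySem.List.pyGetD last i 0 - PySem.List.pyGetD last (i - 1) 0]) []

-- A's 'if not temp: temp = [0]'
def pvTempA (temp : List Int) : List Int := if temp = [] then [0] else temp

-- A's while loop, carrying (new_sequences, its last element) as explicit state; fuel is only a
-- totality guard (each pass shrinks the working list, so length + 2 passes always suffice)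
def pvALoop (fuel : Nat) (acc : List (List Int)) (last : List Int) : List (List Int) :=
  match fuel with
  | 0 => acc
  | fuel + 1 =>
    if check_valid_zero_sequence last then acc
    else pvALoop fuel (acc ++ [pvTempA (pvDiffsA last)]) (pvTempA (pvDiffsA last))

def generate_zero_sequences (sequence : List Int) : List (List Int) :=
  pvALoop (sequence.length + 2) [sequence] sequence

-- ===== PORT B =====
-- B's '[...] or [0]'
def pvOrZero (diffs : List Int) : List Int := if diffs = [] then [0] else diffs

-- B's recursion; fuel is only a totality guard (the difference list shrinks, length + 2 suffices)
def pvAltGo (fuel : Nat) (sequence : List Int) : List (List Int) :=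
  match fuel with
  | 0 => [sequence]
  | fuel + 1 =>
    if sequence.all (fun x => x == 0) then [sequence]
    else
      sequence :: pvAltGo fuel
        (pvOrZero (List.zipWith (fun a b => b - a) sequence sequence.tail))

def generate_zero_sequences_alt (sequence : List Int) : List (List Int) :=
  pvAltGo (sequence.length + 2) sequence

-- ===== PRECONDITION & SPEC =====
def Spec_generate_zero_sequences (sequence : List Int) (out : List (List Int)) : Prop := out = generate_zero_sequences_alt sequence
instance (sequence : List Int) (out : List (List Int)) : Decidable (Spec_generate_zero_sequences sequence out) := by unfold Spec_generate_zero_sequences; infer_instance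

-- ===== CLAIM (what is proved, stated in full; the proofs are below) =====
def Claim_equal_generate_zero_sequences : Prop := ∀ (sequence : List Int), Dom_generate_zero_sequences sequence → Spec_generate_zero_sequences sequence (generate_zero_sequences sequence)

-- ===== LEMMAS AND PROOFS =====
theorem pvDiffsA_eq (s : List Int) :
    pvDiffsA s = List.zipWith (fun a b => b - a) s s.tail := by
  unfold pvDiffsA
  rw [PySem.List.foldl_append_singleton_eq_map, PySem.List.pyRange_one, List.map_map]
  have hlen : ((s.length : Int) - 1).toNat = s.length - 1 := by omega
  refine List.ext_getElem ?_ ?_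
  · simp [List.length_zipWith, hlen]
  · intro j h1 h2
    have hj : j < s.length - 1 := by
      simpa [hlen] using h1
    simp only [List.nil_append, List.getElem_map, List.getElem_range, Function.comp_apply]
    have e1 : (1 : Int) + (j : Int) = ((j + 1 : Nat) : Int) := by push_cast; ring
    have e2 : ((j + 1 : Nat) : Int) - 1 = ((j : Nat) : Int) := by push_cast; ring
    rw [e1, e2, PySem.List.pyGetD_natCast, PySem.List.pyGetD_natCast]
    have hz : j < s.tail.length := by simp [List.length_tail]; omega
    rw [List.getElem_zipWith]
    rw [List.getElem_tail]
    rw [List.getD_eq_getElem s 0 (by omega), List.getD_eq_getElem s 0 (by omega)]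

theorem check_valid_eq_all (s : List Int) :
    check_valid_zero_sequence s = s.all (fun x => x == 0) := by
  induction s with
  | nil => rfl
  | cons a t ih =>
    simp only [check_valid_zero_sequence, List.all_cons, ih]
    by_cases h : a = 0 <;> simp [h]

theorem pvAltGo_cons (fuel : Nat) (s : List Int) : ∃ r, pvAltGo fuel s = s :: r := by
  cases fuel with
  | zero => exact ⟨[], rfl⟩
  | succ f =>
    rw [pvAltGo]
    split
    · exact ⟨[], rfl⟩
    · exact ⟨_, rfl⟩

theorem pvALoop_eq_tail (fuel : Nat) (acc : List (List Int)) (last : List Int) :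
    pvALoop fuel acc last = acc ++ (pvAltGo fuel last).tail := by
  induction fuel generalizing acc last with
  | zero => simp [pvALoop, pvAltGo]
  | succ f ih =>
    rw [pvALoop, pvAltGo]
    by_cases h : check_valid_zero_sequence last = true
    · rw [if_pos h, if_pos (by rw [← check_valid_eq_all]; exact h)]
      simp
    · rw [if_neg h, if_neg (by rw [← check_valid_eq_all]; exact h), ih, List.tail_cons]
      have ht : pvTempA (pvDiffsA last)
          = pvOrZero (List.zipWith (fun a b => b - a) last last.tail) := by
        rw [pvDiffsA_eq]; rfl
      rw [ht]
      obtain ⟨r, hr⟩ :=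
        pvAltGo_cons f (pvOrZero (List.zipWith (fun a b => b - a) last last.tail))
      rw [hr]
      simp

-- ===== VERDICT (by name: the statement is the Claim_ definition above) =====
theorem generate_zero_sequences_spec : Claim_equal_generate_zero_sequences := by
  intro s _
  unfold Spec_generate_zero_sequences generate_zero_sequences generate_zero_sequences_alt
  rw [pvALoop_eq_tail]
  obtain ⟨r, hr⟩ := pvAltGo_cons (s.length + 2) s
  rw [hr]
  simp
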